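-- pv_equiv track=rewrite | github.com/pranavdorbala/card-renal-sim | visualize_logs.py | extract_trajectories
-- ===== SOURCE A (Python) =====
-- def extract_trajectories(records):
--     """Group consecutive multi-step runs into trajectories."""
--     trajectories = []
--     current = []
--     prev_step = 0
--
--     for r in records:
--         step = r.get("step", 1)
--         if step <= prev_step and current:
--             trajectories.append(current)
--             current = []
--         current.append(r)
--         prev_step = step
--
--     if current:
--         trajectories.append(current)
--     return trajectories
-- ===== SOURCE B (Python) =====
-- def extract_trajectories(records):
--     """Group consecutive multi-step runs into trajectories.
--
--     Built back-to-front: fold over the records in reverse, prepending each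
--     record to the following group when the next record's step is larger,
--     otherwise opening a new group.  Groups and their elements are collected
--     in reverse, so one final pass restores the original order.
--     """
--     rev = []  # trajectories, newest-created first; each group newest-appended last
--     for r in reversed(list(records)):
--         s = r.get("step", 1)
--         if rev and rev[-1][-1].get("step", 1) > s:
--             rev[-1].append(r)
--         else:
--             rev.append([r])
--     return [g[::-1] for g in reversed(rev)]
-- ===== Notes on version B (the rewrite author's own statement) =====
-- stated objective: alternative
-- what changed: Replaces A's forward accumulator loop (current group + previous step + flush-on-boundary) with a backwards fold that builds the trajectories back-to-front, prepending each record to the following group when the next step is larger, then reversing once at the end.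
import Mathlib
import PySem

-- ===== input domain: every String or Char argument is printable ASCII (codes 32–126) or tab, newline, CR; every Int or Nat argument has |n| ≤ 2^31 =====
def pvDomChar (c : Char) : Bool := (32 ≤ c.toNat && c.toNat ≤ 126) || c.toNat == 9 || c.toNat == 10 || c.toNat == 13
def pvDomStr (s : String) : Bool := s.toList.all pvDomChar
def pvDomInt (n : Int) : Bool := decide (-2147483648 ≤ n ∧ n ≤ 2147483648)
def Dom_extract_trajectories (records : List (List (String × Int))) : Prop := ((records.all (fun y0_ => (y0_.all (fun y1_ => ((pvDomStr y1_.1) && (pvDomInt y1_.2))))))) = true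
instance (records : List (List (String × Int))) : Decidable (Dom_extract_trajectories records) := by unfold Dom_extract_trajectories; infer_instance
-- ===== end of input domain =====

-- B builds the grouping back-to-front by a reverse fold instead of A's forward flush-on-boundary loop; return values proved equal on all inputs.

-- r.get("step", 1) (first match in the association list, default 1) — shared by both ports, as in both Pythons
def pyGetStep (r : List (String × Int)) : Int := PySem.Dict.getD (PySem.Dict.mk r) "step" 1

-- ===== PORT A =====
-- literal transliteration of A: fold with state (trajectories, current, prev_step), final flush of current
def extract_trajectories (records : List (List (String × Int))) : List (List (List (String × Int))) :=
  let st := records.foldl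
    (fun (st : List (List (List (String × Int))) × List (List (String × Int)) × Int) r =>
      let step := pyGetStep r
      let (trajectories, current, prev_step) := st
      let (trajectories, current) :=
        if step ≤ prev_step ∧ current ≠ [] then (trajectories ++ [current], ([] : List (List (String × Int))))
        else (trajectories, current)
      (trajectories, current ++ [r], step))
    ([], [], 0)
  if st.2.1 ≠ [] then st.1 ++ [st.2.1] else st.1

-- ===== PORT B =====
-- transliteration of Source B: fold over the reversed records. Python appends at the tail of `rev` and of
-- its last group; the port keeps both lists head-first (newest at the head), so Python's final
-- `[g[::-1] for g in reversed(rev)]` is exactly this representation and the state is returned as is.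
def extract_trajectories_alt (records : List (List (String × Int))) : List (List (List (String × Int))) :=
  records.reverse.foldl
    (fun (rev : List (List (List (String × Int)))) r =>
      let s := pyGetStep r
      match rev with
      | (x :: g) :: gs => if pyGetStep x > s then (r :: x :: g) :: gs else [r] :: (x :: g) :: gs
      | _ => [r] :: rev)
    []

-- ===== PRECONDITION & SPEC =====
def Spec_extract_trajectories (records : List (List (String × Int))) (out : List (List (List (String × Int)))) : Prop := out = extract_trajectories_alt records
instance (records : List (List (String × Int))) (out : List (List (List (String × Int)))) : Decidable (Spec_extract_trajectories records out) := by unfold Spec_extract_trajectories; infer_instance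

-- ===== CLAIM (what is proved, stated in full; the proofs are below) =====
def Claim_equal_extract_trajectories : Prop := ∀ (records : List (List (String × Int))), Dom_extract_trajectories records → Spec_extract_trajectories records (extract_trajectories records)

-- ===== LEMMAS AND PROOFS =====

-- canonical recursive grouping both ports are proved equal to:
-- splitRun prev rs = (longest prefix of rs with strictly increasing steps above prev, the rest)
def splitRun (prev : Int) : List (List (String × Int)) → List (List (String × Int)) × List (List (String × Int))
  | [] => ([], [])
  | x :: xs =>
      if pyGetStep x ≤ prev then ([], x :: xs)
      else
        let p := splitRun (pyGetStep x) xs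
        (x :: p.1, p.2)

theorem splitRun_rest_length (prev : Int) (l : List (List (String × Int))) :
    (splitRun prev l).2.length ≤ l.length := by
  induction l generalizing prev with
  | nil => simp [splitRun]
  | cons x xs ih =>
      simp only [splitRun]
      split
      · simp
      · exact Nat.le_succ_of_le (ih _)

def goSpec : List (List (String × Int)) → List (List (List (String × Int)))
  | [] => []
  | r :: rs =>
      let p := splitRun (pyGetStep r) rs
      (r :: p.1) :: goSpec p.2
termination_by l => l.length
decreasing_by
  simpa using Nat.lt_succ_of_le (splitRun_rest_length (pyGetStep r) rs)

-- the loop body of port A, named for the lemmas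
def stepA (st : List (List (List (String × Int))) × List (List (String × Int)) × Int)
    (r : List (String × Int)) : List (List (List (String × Int))) × List (List (String × Int)) × Int :=
  let step := pyGetStep r
  let (trajectories, current, prev_step) := st
  let (trajectories, current) :=
    if step ≤ prev_step ∧ current ≠ [] then (trajectories ++ [current], ([] : List (List (String × Int))))
    else (trajectories, current)
  (trajectories, current ++ [r], step)

def finA (st : List (List (List (String × Int))) × List (List (String × Int)) × Int) :
    List (List (List (String × Int))) :=
  if st.2.1 ≠ [] then st.1 ++ [st.2.1] else st.1

theorem loopA_eq_goSpec (rs : List (List (String × Int)))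
    (traj : List (List (List (String × Int)))) (cur : List (List (String × Int))) (prev : Int)
    (hcur : cur ≠ []) :
    finA (rs.foldl stepA (traj, cur, prev)) =
      traj ++ (cur ++ (splitRun prev rs).1) :: goSpec (splitRun prev rs).2 := by
  induction rs generalizing traj cur prev with
  | nil => simp [splitRun, goSpec, finA, hcur]
  | cons r rs ih =>
      simp only [List.foldl_cons, stepA, splitRun]
      by_cases h : pyGetStep r ≤ prev
      · rw [if_pos ⟨h, hcur⟩, if_pos h]
        show finA (List.foldl stepA (traj ++ [cur], [r], pyGetStep r) rs) = _
        rw [ih (traj ++ [cur]) [r] (pyGetStep r) (by simp)]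
        simp [goSpec, List.append_assoc]
      · rw [if_neg (by tauto), if_neg h]
        show finA (List.foldl stepA (traj, cur ++ [r], pyGetStep r) rs) = _
        rw [ih traj (cur ++ [r]) (pyGetStep r) (by simp)]
        simp [List.append_assoc]

theorem portA_eq_goSpec (records : List (List (String × Int))) :
    extract_trajectories records = goSpec records := by
  cases records with
  | nil => simp [extract_trajectories, goSpec]
  | cons r rs =>
      show finA ((r :: rs).foldl stepA ([], [], 0)) = goSpec (r :: rs)
      simp only [List.foldl_cons, stepA]
      rw [if_neg (by simp)]
      show finA (List.foldl stepA ([], [r], pyGetStep r) rs) = _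
      rw [loopA_eq_goSpec rs [] [r] (pyGetStep r) (by simp)]
      simp [goSpec]

-- the loop body of port B
def stepB (rev : List (List (List (String × Int)))) (r : List (String × Int)) :
    List (List (List (String × Int))) :=
  let s := pyGetStep r
  match rev with
  | (x :: g) :: gs => if pyGetStep x > s then (r :: x :: g) :: gs else [r] :: (x :: g) :: gs
  | _ => [r] :: rev

theorem stepB_goSpec (r : List (String × Int)) (rs : List (List (String × Int))) :
    stepB (goSpec rs) r = goSpec (r :: rs) := by
  cases rs with
  | nil => simp [goSpec, splitRun, stepB]
  | cons x xs =>
      rw [goSpec, goSpec]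
      simp only [stepB, splitRun]
      by_cases h : pyGetStep x ≤ pyGetStep r
      · rw [if_neg (by omega), if_pos h]
        simp [goSpec]
      · rw [if_pos (by omega), if_neg h]

theorem portB_eq_goSpec (records : List (List (String × Int))) :
    extract_trajectories_alt records = goSpec records := by
  induction records with
  | nil => simp [extract_trajectories_alt, goSpec]
  | cons r rs ih =>
      show (List.foldl stepB [] (r :: rs).reverse) = goSpec (r :: rs)
      rw [List.reverse_cons, List.foldl_append]
      have : List.foldl stepB [] rs.reverse = goSpec rs := ih
      rw [this]
      simpa using stepB_goSpec r rs

-- ===== VERDICT (by name: the statement is the Claim_ definition above) =====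
theorem extract_trajectories_spec : Claim_equal_extract_trajectories := by
  intro records _
  show extract_trajectories records = extract_trajectories_alt records
  rw [portA_eq_goSpec, portB_eq_goSpec]
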